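-- pv_equiv track=rewrite | github.com/herryliannthu/demo_of_my_projects | PYTHON/code/Camp_Game/games_cal.py | Select_8
-- ===== SOURCE A (Python) =====
-- def Select_8(Choice,Country):
--     if (Choice == 1):
--         Country["B"]["Value"]+=10
--         Country["N"]["Value"]-=30
--     elif (Choice == 2):
--         Country["N"]["Value"]+=40
--         Country["B"]["Value"]-=30
--     elif(Choice == 0):
--         pass
--     elif(Choice == -1):
--         for people in Country:
--             if (people == "D"):
--                 pass
--             else:
--                 Country[people]["Value"]-=10
--     else:
--         print ("Error !! Your choice {} is not allowed".format(Choice))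
--         return None
--     return Country
-- ===== SOURCE B (Python) =====
-- # Table-driven re-implementation: the scalar choices dispatch through an
-- # EFFECTS table of per-country deltas; one uniform pass applies the deltas.
-- # Like A it mutates Country's inner dicts in place; equivalence claimed on
-- # the return value.
-- EFFECTS = {1: {"B": 10, "N": -30}, 2: {"N": 40, "B": -30}, 0: {}}
--
--
-- def Select_8(Choice, Country):
--     if Choice == -1:
--         eff = {k: -10 for k in Country if k != "D"}
--     elif Choice in EFFECTS:
--         eff = EFFECTS[Choice]
--     else:
--         print("Error !! Your choice {} is not allowed".format(Choice))
--         return None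
--     for k, v in Country.items():
--         if k in eff:
--             v["Value"] = v["Value"] + eff[k]
--     return Country
-- ===== Notes on version B (the rewrite author's own statement) =====
-- stated objective: idiomatic
-- what changed: Replaces A's hard-coded per-branch index updates and the -1 key loop by an EFFECTS dispatch table of per-country deltas (the -1 case builds its delta dict by comprehension) applied in one uniform pass over Country.items().
import Mathlib
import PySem

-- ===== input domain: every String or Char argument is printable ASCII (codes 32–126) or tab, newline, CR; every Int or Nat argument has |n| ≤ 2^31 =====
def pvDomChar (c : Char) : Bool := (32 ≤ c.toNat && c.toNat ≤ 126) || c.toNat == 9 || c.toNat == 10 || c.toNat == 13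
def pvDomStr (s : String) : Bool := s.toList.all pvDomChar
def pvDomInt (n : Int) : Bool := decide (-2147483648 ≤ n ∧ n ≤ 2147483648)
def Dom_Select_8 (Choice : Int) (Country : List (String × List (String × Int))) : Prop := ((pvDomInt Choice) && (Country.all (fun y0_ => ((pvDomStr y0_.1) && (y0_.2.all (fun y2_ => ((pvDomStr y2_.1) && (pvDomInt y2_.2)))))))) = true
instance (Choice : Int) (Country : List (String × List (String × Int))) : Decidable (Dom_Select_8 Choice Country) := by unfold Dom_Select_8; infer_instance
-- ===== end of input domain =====

-- B replaces A's hard-coded per-branch updates by an EFFECTS delta table and one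
-- uniform pass over the dict (objective: idiomatic). Both Pythons mutate Country's
-- inner dicts in place identically; the equivalence proved here is about the
-- return value.

-- boundary conversion (shared): a Python dict argument arrives as an assoc list
def pvToDict (Country : List (String × List (String × Int))) : PySem.Dict String (PySem.Dict String Int) :=
  PySem.Dict.ofList (Country.map (fun p => (p.1, PySem.Dict.ofList p.2)))

def pvFromDict (d : PySem.Dict String (PySem.Dict String Int)) : List (String × List (String × Int)) :=
  d.items.map (fun p => (p.1, p.2.items))

-- ===== PORT A =====
def Select_8 (Choice : Int) (Country : List (String × List (String × Int))) : Option (List (String × List (String × Int))) :=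
  let d := pvToDict Country
  if Choice = 1 then
    -- Country["B"]["Value"] += 10 ; Country["N"]["Value"] -= 30  (Pre_ guarantees the keys exist)
    let d1 := d.modify "B" PySem.Dict.empty (fun v => v.modify "Value" 0 (fun x => x + 10))
    let d2 := d1.modify "N" PySem.Dict.empty (fun v => v.modify "Value" 0 (fun x => x - 30))
    some (pvFromDict d2)
  else if Choice = 2 then
    let d1 := d.modify "N" PySem.Dict.empty (fun v => v.modify "Value" 0 (fun x => x + 40))
    let d2 := d1.modify "B" PySem.Dict.empty (fun v => v.modify "Value" 0 (fun x => x - 30))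
    some (pvFromDict d2)
  else if Choice = 0 then
    some (pvFromDict d)
  else if Choice = -1 then
    let d2 := d.keys.foldl (fun acc people =>
      if people = "D" then acc
      else acc.modify people PySem.Dict.empty (fun v => v.modify "Value" 0 (fun x => x - 10))) d
    some (pvFromDict d2)
  else
    -- print(...); return None
    none

-- ===== PORT B =====
-- EFFECTS = {1: {"B": 10, "N": -30}, 2: {"N": 40, "B": -30}, 0: {}}  (literal dicts, distinct keys)
def pvEFFECTS : PySem.Dict Int (PySem.Dict String Int) :=
  PySem.Dict.mk [(1, PySem.Dict.mk [("B", 10), ("N", -30)]),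
                 (2, PySem.Dict.mk [("N", 40), ("B", -30)]),
                 (0, PySem.Dict.mk [])]

-- for k, v in Country.items(): if k in eff: v["Value"] = v["Value"] + eff[k]
def pvApplyEff (d : PySem.Dict String (PySem.Dict String Int)) (eff : PySem.Dict String Int) : List (String × List (String × Int)) :=
  (d.items.map (fun p =>
    if eff.contains p.1 then (p.1, p.2.insert "Value" (p.2.getD "Value" 0 + eff.getD p.1 0)) else p)).map
    (fun p => (p.1, p.2.items))

def Select_8_alt (Choice : Int) (Country : List (String × List (String × Int))) : Option (List (String × List (String × Int))) :=
  let d := pvToDict Country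
  if Choice = -1 then
    -- eff = {k: -10 for k in Country if k != "D"}  (keys drawn from d.keys are distinct, so the
    -- comprehension's items are exactly this list)
    some (pvApplyEff d (PySem.Dict.mk ((d.keys.filter (fun k => k != "D")).map (fun k => (k, (-10 : Int))))))
  else if pvEFFECTS.contains Choice then
    some (pvApplyEff d (pvEFFECTS.getD Choice PySem.Dict.empty))
  else
    -- print(...); return None
    none

-- ===== PRECONDITION & SPEC =====
-- Pre_ excludes exactly the inputs on which A raises KeyError: for Choice 1 or 2, a country
-- "B" or "N" missing or lacking a "Value" entry; for Choice -1, a country other than "D"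
-- lacking a "Value" entry.
def pvHasValue (d : PySem.Dict String (PySem.Dict String Int)) (k : String) : Bool :=
  ((d.get? k).map (fun v => v.contains "Value")).getD false

def Pre_Select_8 (Choice : Int) (Country : List (String × List (String × Int))) : Prop :=
  ((Choice = 1 ∨ Choice = 2) → (pvHasValue (pvToDict Country) "B" ∧ pvHasValue (pvToDict Country) "N")) ∧
  (Choice = -1 → ∀ p ∈ (pvToDict Country).items, p.1 ≠ "D" → p.2.contains "Value" = true)

instance (Choice : Int) (Country : List (String × List (String × Int))) : Decidable (Pre_Select_8 Choice Country) := by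
  unfold Pre_Select_8; infer_instance

def pvWitness_Select_8 : Int × (List (String × List (String × Int))) :=
  (1, [("B", [("Value", 5)]), ("N", [("Value", 3)]), ("D", [("Value", 7)])])

def Spec_Select_8 (Choice : Int) (Country : List (String × List (String × Int))) (out : Option (List (String × List (String × Int)))) : Prop := out = Select_8_alt Choice Country
instance (Choice : Int) (Country : List (String × List (String × Int))) (out : Option (List (String × List (String × Int)))) : Decidable (Spec_Select_8 Choice Country out) := by unfold Spec_Select_8; infer_instance

-- ===== CLAIM (what is proved, stated in full; the proofs are below) =====
def Claim_equal_Select_8 : Prop := ∀ (Choice : Int) (Country : List (String × List (String × Int))), Dom_Select_8 Choice Country → Pre_Select_8 Choice Country → Spec_Select_8 Choice Country (Select_8 Choice Country)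

-- ===== LEMMAS AND PROOFS =====

theorem pv_items_modify {ν : Type} (d : PySem.Dict String ν) (k : String) (dflt : ν) (f : ν → ν)
    (hc : d.contains k = true) (hnd : d.keys.Nodup) :
    (d.modify k dflt f).items = d.items.map (fun p => if p.1 = k then (k, f p.2) else p) := by
  show (d.insert k (f (d.getD k dflt))).items = _
  rw [PySem.Dict.items_insert_of_contains d _ hc]
  apply List.map_congr_left
  intro p hp
  by_cases h : p.1 = k
  · have hpe : (k, p.2) = p := by rw [← h]
    have hp' : (k, p.2) ∈ d.items := hpe ▸ hp
    have := PySem.Dict.getD_of_mem_items d hp' hnd dflt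
    simp [h, this]
  · simp [h]

theorem pv_keys_modify_of_contains {ν : Type} (d : PySem.Dict String ν) (k : String) (dflt : ν) (f : ν → ν)
    (hc : d.contains k = true) (hnd : d.keys.Nodup) :
    (d.modify k dflt f).keys = d.keys := by
  show ((d.modify k dflt f).items.map (fun p => p.1)) = d.items.map (fun p => p.1)
  rw [pv_items_modify d k dflt f hc hnd, List.map_map]
  apply List.map_congr_left
  intro p _
  by_cases h : p.1 = k <;> simp [h]

theorem pv_mk_const_getD (l : List String) (c : Int) (s : String) (h : s ∈ l) (d0 : Int) :
    (PySem.Dict.mk (l.map (fun k => (k, c)))).getD s d0 = c := by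
  induction l with
  | nil => cases h
  | cons a l ih =>
    by_cases ha : a = s
    · simp [PySem.Dict.getD, PySem.Dict.get?, ha]
    · have hs : s ∈ l := by
        rcases List.mem_cons.mp h with h' | h'
        · exact absurd h'.symm ha
        · exact h'
      have := ih hs
      simpa [PySem.Dict.getD, PySem.Dict.get?, ha] using this

theorem pv_foldl_items (ks : List String) (d : PySem.Dict String (PySem.Dict String Int))
    (hks : ks.Nodup) (hnd : d.keys.Nodup) (hsub : ∀ k ∈ ks, d.contains k = true) :
    (ks.foldl (fun acc people =>
      if people = "D" then acc
      else acc.modify people PySem.Dict.empty (fun v => v.modify "Value" 0 (fun x => x - 10))) d).items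
    = d.items.map (fun p => if p.1 ∈ ks ∧ p.1 ≠ "D" then (p.1, p.2.modify "Value" 0 (fun x => x - 10)) else p) := by
  induction ks generalizing d with
  | nil => simp
  | cons k rest ih =>
    have hkrest : k ∉ rest := (List.nodup_cons.mp hks).1
    have hrest : rest.Nodup := (List.nodup_cons.mp hks).2
    rw [List.foldl_cons]
    by_cases hk : k = "D"
    · rw [if_pos hk]
      have hsubr : ∀ j ∈ rest, d.contains j = true :=
        fun j hj => hsub j (List.mem_cons_of_mem _ hj)
      rw [ih d hrest hnd hsubr]
      apply List.map_congr_left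
      intro p _
      by_cases hD : p.1 = "D"
      · simp [hD]
      · have hpk : p.1 = k → False := fun he => hD (he.trans hk)
        simp only [List.mem_cons, hD, ne_eq, not_false_iff, and_true]
        have : (p.1 = k ∨ p.1 ∈ rest) ↔ p.1 ∈ rest :=
          ⟨fun h' => h'.elim (fun he => absurd he hpk) id, Or.inr⟩
        simp only [this]
    · rw [if_neg hk]
      have hc : d.contains k = true := hsub k List.mem_cons_self
      set f : PySem.Dict String Int → PySem.Dict String Int :=
        fun v => v.modify "Value" 0 (fun x => x - 10) with hf
      have hnd' : (d.modify k PySem.Dict.empty f).keys.Nodup := by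
        rw [pv_keys_modify_of_contains d k _ f hc hnd]; exact hnd
      have hsub'' : ∀ j ∈ rest, (d.modify k PySem.Dict.empty f).contains j = true := by
        intro j hj
        rw [PySem.Dict.contains_modify]
        simp [hsub j (List.mem_cons_of_mem _ hj)]
      rw [ih _ hrest hnd' hsub'', pv_items_modify d k _ f hc hnd, List.map_map]
      apply List.map_congr_left
      intro p _
      by_cases h : p.1 = k
      · simp [h, hk, hkrest, hf]
      · simp only [Function.comp_def, if_neg h, List.mem_cons]
        have : (p.1 = k ∨ p.1 ∈ rest) ↔ p.1 ∈ rest := by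
          constructor
          · rintro (rfl | hm)
            · exact absurd rfl h
            · exact hm
          · exact Or.inr
        simp only [this]

theorem pv_hasValue_contains (d : PySem.Dict String (PySem.Dict String Int)) (k : String)
    (h : pvHasValue d k = true) : d.contains k = true := by
  unfold pvHasValue at h
  cases hg : d.get? k with
  | none => rw [hg] at h; simp at h
  | some v => rw [PySem.Dict.contains_eq_isSome_get?, hg]; rfl

theorem pv_two_mod (d : PySem.Dict String (PySem.Dict String Int)) (hnd : d.keys.Nodup)
    (k1 k2 : String) (d1 d2 : Int) (hk : ¬ k1 = k2)
    (hc1 : d.contains k1 = true) (hc2 : d.contains k2 = true) :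
    pvFromDict ((d.modify k1 PySem.Dict.empty (fun v => v.modify "Value" 0 (fun x => x + d1))).modify k2
        PySem.Dict.empty (fun v => v.modify "Value" 0 (fun x => x + d2)))
      = pvApplyEff d (PySem.Dict.mk [(k1, d1), (k2, d2)]) := by
  have hnd1 : (d.modify k1 PySem.Dict.empty (fun v => v.modify "Value" 0 (fun x => x + d1))).keys.Nodup := by
    rw [pv_keys_modify_of_contains _ _ _ _ hc1 hnd]; exact hnd
  have hc2' : (d.modify k1 PySem.Dict.empty (fun v => v.modify "Value" 0 (fun x => x + d1))).contains k2 = true := by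
    rw [PySem.Dict.contains_modify]; simp [hc2]
  unfold pvFromDict pvApplyEff
  rw [pv_items_modify _ k2 _ _ hc2' hnd1, pv_items_modify d k1 _ _ hc1 hnd,
    List.map_map, List.map_map, List.map_map]
  apply List.map_congr_left
  intro p hp
  have hk' : ¬ k2 = k1 := fun h => hk h.symm
  by_cases e1 : p.1 = k1
  · have e1' : ¬ k2 = p.1 := fun h => hk' (h.trans e1)
    simp [Function.comp_def, e1, hk, hk', PySem.Dict.contains_mk,
      PySem.Dict.modify, PySem.Dict.getD, PySem.Dict.get?, List.find?, beq_iff_eq]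
  · by_cases e2 : p.1 = k2
    · have e2' : ¬ k1 = p.1 := fun h => hk (h.trans e2)
      have hkb : (k1 == k2) = false := by simp [hk]
      simp [Function.comp_def, e2, hk', hkb, PySem.Dict.contains_mk,
        PySem.Dict.modify, PySem.Dict.getD, PySem.Dict.get?, List.find?, beq_iff_eq]
    · have e1' : ¬ k1 = p.1 := fun h => e1 h.symm
      have e2' : ¬ k2 = p.1 := fun h => e2 h.symm
      simp [Function.comp_def, e1, e2, e1', e2', PySem.Dict.contains_mk, beq_iff_eq]

theorem pv_main (Choice : Int) (Country : List (String × List (String × Int)))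
    (hpre : Pre_Select_8 Choice Country) :
    Select_8 Choice Country = Select_8_alt Choice Country := by
  unfold Select_8 Select_8_alt
  have hnd : (pvToDict Country).keys.Nodup := PySem.Dict.nodup_keys_ofList _
  set d := pvToDict Country with hd
  have hsub30 : (fun x : Int => x - 30) = (fun x : Int => x + (-30)) := funext fun x => sub_eq_add_neg x 30
  by_cases h1 : Choice = 1
  · subst h1
    have hcB := pv_hasValue_contains d "B" (hpre.1 (Or.inl rfl)).1
    have hcN := pv_hasValue_contains d "N" (hpre.1 (Or.inl rfl)).2
    rw [if_pos rfl, if_neg (by decide : ¬ (1 : Int) = -1), if_pos (by decide : pvEFFECTS.contains 1 = true)]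
    have heff : pvEFFECTS.getD 1 PySem.Dict.empty = PySem.Dict.mk [("B", 10), ("N", -30)] := by decide
    rw [heff, hsub30]
    exact congrArg some (pv_two_mod d hnd "B" "N" 10 (-30) (by decide) hcB hcN)
  by_cases h2 : Choice = 2
  · subst h2
    have hcB := pv_hasValue_contains d "B" (hpre.1 (Or.inr rfl)).1
    have hcN := pv_hasValue_contains d "N" (hpre.1 (Or.inr rfl)).2
    rw [if_neg h1, if_pos rfl, if_neg (by decide : ¬ (2 : Int) = -1), if_pos (by decide : pvEFFECTS.contains 2 = true)]
    have heff : pvEFFECTS.getD 2 PySem.Dict.empty = PySem.Dict.mk [("N", 40), ("B", -30)] := by decide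
    rw [heff, hsub30]
    exact congrArg some (pv_two_mod d hnd "N" "B" 40 (-30) (by decide) hcN hcB)
  by_cases h0 : Choice = 0
  · subst h0
    rw [if_neg h1, if_neg h2, if_pos rfl, if_neg (by decide : ¬ (0 : Int) = -1),
      if_pos (by decide : pvEFFECTS.contains 0 = true)]
    have heff : pvEFFECTS.getD 0 PySem.Dict.empty = PySem.Dict.mk [] := by decide
    rw [heff]
    simp [pvFromDict, pvApplyEff, PySem.Dict.contains_mk]
  by_cases hm1 : Choice = -1
  · subst hm1
    rw [if_neg h1, if_neg h2, if_neg h0, if_pos rfl, if_pos rfl]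
    have hval := hpre.2 rfl
    have hsub : ∀ k ∈ d.keys, d.contains k = true :=
      fun k hk => (PySem.Dict.contains_iff_mem_keys d k).mpr hk
    unfold pvFromDict pvApplyEff
    dsimp only
    rw [pv_foldl_items d.keys d hnd hnd hsub, List.map_map, List.map_map]
    refine congrArg some (List.map_congr_left ?_)
    intro p hp
    have hpk : p.1 ∈ d.keys := PySem.Dict.mem_keys_of_mem_items d hp
    by_cases hD : p.1 = "D"
    · simp [Function.comp_def, hD]
    · have hmem : p.1 ∈ d.keys.filter (fun k => k != "D") :=
        List.mem_filter.mpr ⟨hpk, by simp [hD]⟩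
      have hgd := pv_mk_const_getD (d.keys.filter (fun k => k != "D")) (-10) p.1 hmem 0
      simp [Function.comp_def, hD, hpk, hgd,
        PySem.Dict.modify, sub_eq_add_neg]
  · simp only [if_neg h1, if_neg h2, if_neg h0, if_neg hm1]
    have : pvEFFECTS.contains Choice = false := by
      simp [pvEFFECTS, PySem.Dict.contains_mk]
      exact ⟨fun h => h1 h.symm, fun h => h2 h.symm, fun h => h0 h.symm⟩
    simp [this]

-- ===== VERDICT (by name: the statement is the Claim_ definition above) =====
theorem Select_8_spec : Claim_equal_Select_8 := by
  intro Choice Country _ hpre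
  exact pv_main Choice Country hpre
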